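-- pv_equiv track=rewrite | github.com/manujgarg10/music-webapp-mvp | app/services/analysis.py | suggest_capo
-- ===== SOURCE A (Python) =====
-- PITCH_CLASSES = ["C", "C#", "D", "D#", "E", "F", "F#", "G", "G#", "A", "A#", "B"]
--
-- def parse_chord(chord_name: str) -> tuple[str | None, str]:
--     if chord_name == "N":
--         return None, "unknown"
--     if chord_name.endswith("m"):
--         return chord_name[:-1], "minor"
--     return chord_name, "major"
--
-- OPEN_CHORD_SHAPES = {
--     "C", "D", "E", "G", "A", "Am", "Em", "Dm", "D7", "A7", "E7", "Cadd9", "Gsus4", "Dsus4"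
-- }
--
-- def suggest_capo(progression_summary: list[str]) -> str:
--     filtered = [chord for chord in progression_summary if chord != "N"]
--     if not filtered:
--         return "No capo suggestion available."
--     if all(chord in OPEN_CHORD_SHAPES for chord in filtered[:8]):
--         return "No capo needed. The detected progression already sits well in open-position shapes."
--
--     best_capo = 0
--     best_score = -1
--     best_shapes: list[str] = filtered
--     for capo in range(0, 8):
--         transposed = [transpose_chord_name(chord, capo) for chord in filtered]
--         score = sum(1 for chord in transposed if chord in OPEN_CHORD_SHAPES)
--         if capo == 0:
--             score += 1.5
--         if score > best_score:
--             best_score = score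
--             best_capo = capo
--             best_shapes = transposed
--
--     if best_capo == 0:
--         return "No capo needed. The detected progression already sits well in open-position shapes."
--     shown_shapes = " - ".join(best_shapes[:4])
--     return f"Try capo {best_capo} if you want easier open shapes. Relative chord shapes start like: {shown_shapes}."
--
-- def transpose_chord_name(chord_name: str, capo: int) -> str:
--     root, quality = parse_chord(chord_name)
--     if root is None:
--         return chord_name
--     root_index = PITCH_CLASSES.index(root)
--     transposed_root = PITCH_CLASSES[(root_index - capo) % 12]
--     return transposed_root if quality == "major" else f"{transposed_root}m"
-- ===== SOURCE B (Python) =====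
-- PITCH_CLASSES = ["C", "C#", "D", "D#", "E", "F", "F#", "G", "G#", "A", "A#", "B"]
--
-- OPEN_CHORD_SHAPES = {
--     "C", "D", "E", "G", "A", "Am", "Em", "Dm", "D7", "A7", "E7", "Cadd9", "Gsus4", "Dsus4"
-- }
--
-- # Inverted open-shape table: a transposed chord name can only be an open shape when it
-- # is a bare pitch-class name (majors C D E G A) or pitch-class + "m" (minors Dm Em Am),
-- # so a chord with root index r and given quality lands on an open shape at capo c
-- # exactly when (r - c) % 12 is one of these root indices, i.e. c = (r - t) % 12.
-- OPEN_MAJOR_ROOT_IDX = (0, 2, 4, 7, 9)   # C D E G A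
-- OPEN_MINOR_ROOT_IDX = (2, 4, 9)         # Dm Em Am
--
--
-- def _shape(chord, capo):
--     minor = chord.endswith("m")
--     root = chord[:-1] if minor else chord
--     name = PITCH_CLASSES[(PITCH_CLASSES.index(root) - capo) % 12]
--     return name + "m" if minor else name
--
--
-- def suggest_capo(progression_summary):
--     filtered = [c for c in progression_summary if c != "N"]
--     if not filtered:
--         return "No capo suggestion available."
--     if all(c in OPEN_CHORD_SHAPES for c in filtered[:8]):
--         return "No capo needed. The detected progression already sits well in open-position shapes."
--
--     # Score capos by table inversion: each chord adds 1 to the capos that make it open.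
--     scores = [0.0] * 8
--     for chord in filtered:
--         minor = chord.endswith("m")
--         root = chord[:-1] if minor else chord
--         r = PITCH_CLASSES.index(root)
--         for t in (OPEN_MINOR_ROOT_IDX if minor else OPEN_MAJOR_ROOT_IDX):
--             capo = (r - t) % 12
--             if capo < 8:
--                 scores[capo] += 1
--     scores[0] += 1.5  # bias towards playing without a capo
--
--     best_capo = 0
--     for c in range(1, 8):
--         if scores[c] > scores[best_capo]:
--             best_capo = c
--
--     if best_capo == 0:
--         return "No capo needed. The detected progression already sits well in open-position shapes."
--     shown_shapes = " - ".join(_shape(chord, best_capo) for chord in filtered[:4])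
--     return f"Try capo {best_capo} if you want easier open shapes. Relative chord shapes start like: {shown_shapes}."
-- ===== Notes on version B (the rewrite author's own statement) =====
-- stated objective: alternative
-- what changed: B scores capos by an inverted open-shape table: each chord's root index directly yields the capos c = (root - t) % 12 at which it becomes an open shape (t ranging over the open major/minor root indices), instead of A's rebuilding and re-scoring the whole transposed progression for each of the 8 capos; B then argmaxes the 8 scores and transposes only the first four chords at the winning capo.
import Mathlib
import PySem

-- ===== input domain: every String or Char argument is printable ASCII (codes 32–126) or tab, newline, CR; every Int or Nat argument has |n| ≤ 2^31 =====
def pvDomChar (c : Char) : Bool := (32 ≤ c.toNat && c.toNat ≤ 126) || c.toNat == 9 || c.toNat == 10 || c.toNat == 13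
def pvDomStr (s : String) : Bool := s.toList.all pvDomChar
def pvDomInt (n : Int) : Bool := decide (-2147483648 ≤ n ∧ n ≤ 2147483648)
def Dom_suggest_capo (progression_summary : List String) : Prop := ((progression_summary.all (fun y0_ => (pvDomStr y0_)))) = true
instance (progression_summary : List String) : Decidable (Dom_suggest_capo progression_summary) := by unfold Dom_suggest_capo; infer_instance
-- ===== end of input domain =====

-- B scores capos by an inverted open-shape table (each chord adds 1 directly to the
-- capos c = (root - t) % 12 at which it becomes an open shape) instead of A's per-capo
-- rebuild of the whole transposed progression; argmax afterwards, and the shown shapes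
-- are transposed only for the first four chords at the winning capo (objective: alternative).
-- Python scores are floats that are integer multiples of 0.5; both ports carry them
-- exactly as doubled Ints (hit = 2, capo-0 bonus 1.5 = 3); all comparisons agree.

-- ===== PORT A =====
def pitchClasses : List String := ["C", "C#", "D", "D#", "E", "F", "F#", "G", "G#", "A", "A#", "B"]

def openChordShapes : List String :=
  ["C", "D", "E", "G", "A", "Am", "Em", "Dm", "D7", "A7", "E7", "Cadd9", "Gsus4", "Dsus4"]

-- parse_chord; chord_name[:-1] = dropLast (PySem.List.slice_to_neg_one)
def parseChord (chordName : String) : Option String × String :=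
  if chordName = "N" then (none, "unknown")
  else if PySem.Str.endswith chordName "m" then (some (String.ofList chordName.toList.dropLast), "minor")
  else (chordName, "major")

-- transpose_chord_name; PITCH_CLASSES.index(root) raises ValueError when root is
-- absent — Pre_ excludes exactly those inputs, the `.getD 0` default is unreachable
-- under Pre_.  (root_index - capo) % 12 always lies in [0,12), so pyGet? is some.
def transposeChordName (chordName : String) (capo : Int) : String :=
  match parseChord chordName with
  | (none, _) => chordName
  | (some root, quality) =>
    let rootIndex : Int := ((PySem.List.index? pitchClasses root).getD 0 : Nat)
    let transposedRoot := (PySem.List.pyGet? pitchClasses (PySem.Int.mod (rootIndex - capo) 12)).getD ""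
    if quality = "major" then transposedRoot else transposedRoot ++ "m"

def suggest_capo (progression_summary : List String) : String :=
  let filtered := progression_summary.filter (fun chord => chord ≠ "N")
  if filtered = [] then "No capo suggestion available."
  else if (PySem.List.slice filtered none (some 8)).all (fun chord => openChordShapes.contains chord) then
    "No capo needed. The detected progression already sits well in open-position shapes."
  else
    -- scores doubled: score > best_score over floats = doubled comparison; init -1 → -2
    let st := (PySem.List.pyRange 0 8 1).foldl (fun (st : Int × Int × List String) capo =>
        let transposed := filtered.map (fun chord => transposeChordName chord capo)
        let score : Int := 2 * (transposed.countP (fun chord => openChordShapes.contains chord) : Int) +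
          (if capo = 0 then 3 else 0)
        if score > st.2.1 then (capo, score, transposed) else st) (0, -2, filtered)
    if st.1 = 0 then "No capo needed. The detected progression already sits well in open-position shapes."
    else
      let shownShapes := PySem.Str.join " - " (PySem.List.slice st.2.2 none (some 4))
      "Try capo " ++ PySem.Int.toStr st.1 ++
        " if you want easier open shapes. Relative chord shapes start like: " ++ shownShapes ++ "."

-- ===== PORT B =====
-- open-shape root indices per quality (C D E G A / Dm Em Am)
def openMajorRootIdx : List Int := [0, 2, 4, 7, 9]
def openMinorRootIdx : List Int := [2, 4, 9]

-- B's _shape helper (no "N" check: filtered chords are never "N")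
def shapeAt (chord : String) (capo : Int) : String :=
  let minor := PySem.Str.endswith chord "m"
  let root := if minor then String.ofList chord.toList.dropLast else chord
  let name := (PySem.List.pyGet? pitchClasses
    (PySem.Int.mod ((((PySem.List.index? pitchClasses root).getD 0 : Nat) : Int) - capo) 12)).getD ""
  if minor then name ++ "m" else name

def suggest_capo_alt (progression_summary : List String) : String :=
  let filtered := progression_summary.filter (fun chord => chord ≠ "N")
  if filtered = [] then "No capo suggestion available."
  else if (PySem.List.slice filtered none (some 8)).all (fun chord => openChordShapes.contains chord) then
    "No capo needed. The detected progression already sits well in open-position shapes."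
  else
    -- table-inverted scoring pass (doubled scores, hit = 2); scores[capo] += 1 is the
    -- rebuild-at-one-index of the length-8 array
    let scores0 : List Int := filtered.foldl (fun sc chord =>
        let minor := PySem.Str.endswith chord "m"
        let root := if minor then String.ofList chord.toList.dropLast else chord
        let r : Int := ((PySem.List.index? pitchClasses root).getD 0 : Nat)
        (if minor then openMinorRootIdx else openMajorRootIdx).foldl (fun sc t =>
          if PySem.Int.mod (r - t) 12 < 8 then
            (List.range 8).map (fun j => sc.getD j 0 + if (j : Int) = PySem.Int.mod (r - t) 12 then 2 else 0)
          else sc) sc)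
      (List.replicate 8 0)
    -- scores[0] += 1.5 (doubled: 3)
    let scores := match scores0 with
      | [] => []
      | s0 :: rest => (s0 + 3) :: rest
    let bestCapo : Nat := (List.range' 1 7).foldl
      (fun best capo => if scores.getD capo 0 > scores.getD best 0 then capo else best) 0
    if bestCapo = 0 then "No capo needed. The detected progression already sits well in open-position shapes."
    else
      let shownShapes := PySem.Str.join " - "
        ((PySem.List.slice filtered none (some 4)).map (fun chord => shapeAt chord (bestCapo : Int)))
      "Try capo " ++ PySem.Int.toStr (bestCapo : Int) ++
        " if you want easier open shapes. Relative chord shapes start like: " ++ shownShapes ++ "."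

-- ===== PRECONDITION & SPEC =====
-- root of a non-"N" chord as parse_chord extracts it (independent of the ports)
def pvChordRootOk (chord : String) : Bool :=
  pitchClasses.contains
    (if PySem.Str.endswith chord "m" then String.ofList chord.toList.dropLast else chord)

-- A raises ValueError (PITCH_CLASSES.index) when the scoring loop is reached and some
-- kept chord's root is not a pitch class; Pre_ keeps exactly the inputs where A returns.
def Pre_suggest_capo (progression_summary : List String) : Prop :=
  (progression_summary.filter (fun chord => chord ≠ "N") = []) ∨
  ((PySem.List.slice (progression_summary.filter (fun chord => chord ≠ "N")) none (some 8)).all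
      (fun chord => openChordShapes.contains chord) = true) ∨
  ((progression_summary.filter (fun chord => chord ≠ "N")).all pvChordRootOk = true)

instance (progression_summary : List String) : Decidable (Pre_suggest_capo progression_summary) := by
  unfold Pre_suggest_capo; infer_instance

def pvWitness_suggest_capo : List String := ["B", "F#", "Am", "N", "C"]

def Spec_suggest_capo (progression_summary : List String) (out : String) : Prop := out = suggest_capo_alt progression_summary
instance (progression_summary : List String) (out : String) : Decidable (Spec_suggest_capo progression_summary out) := by unfold Spec_suggest_capo; infer_instance

-- ===== CLAIM (what is proved, stated in full; the proofs are below) =====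
def Claim_equal_suggest_capo : Prop := ∀ (progression_summary : List String), Dom_suggest_capo progression_summary → Pre_suggest_capo progression_summary → Spec_suggest_capo progression_summary (suggest_capo progression_summary)

-- ===== LEMMAS AND PROOFS =====

def pvCnt (fl : List String) (c : Int) : Int :=
  (fl.countP (fun chord => openChordShapes.contains (transposeChordName chord c)) : Int)

def pvF (fl : List String) (c : Int) : Int := 2 * pvCnt fl c + (if c = 0 then 3 else 0)

def pvShapes (fl : List String) (c : Int) : List String :=
  fl.map (fun chord => transposeChordName chord c)

def pvArg (fl : List String) : Int :=
  ([1, 2, 3, 4, 5, 6, 7] : List Nat).foldl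
    (fun (bb : Int) (c : Nat) => if pvF fl (c : Int) > pvF fl bb then (c : Int) else bb) 0

theorem pvArg_eq (fl : List String) :
    ([1, 2, 3, 4, 5, 6, 7] : List Int).foldl
      (fun b c => if pvF fl c > pvF fl b then c else b) 0 = pvArg fl := by
  norm_num [pvArg, List.foldl_cons, List.foldl_nil]

theorem pvCnt_nonneg (fl : List String) (c : Int) : 0 ≤ pvCnt fl c := Int.natCast_nonneg _

-- A's selection loop keeps the invariant (best, score-of-best, shapes-of-best)
theorem pvA_fold (fl : List String) (l : List Int) (b0 : Int) :
    l.foldl (fun (st : Int × Int × List String) capo =>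
        if (2 * (((fl.map (fun chord => transposeChordName chord capo)).countP
              (fun chord => openChordShapes.contains chord) : Nat) : Int) +
            if capo = 0 then 3 else 0) > st.2.1 then
          (capo,
            2 * (((fl.map (fun chord => transposeChordName chord capo)).countP
              (fun chord => openChordShapes.contains chord) : Nat) : Int) +
            if capo = 0 then 3 else 0,
            fl.map (fun chord => transposeChordName chord capo))
        else st)
      (b0, pvF fl b0, pvShapes fl b0)
    = (l.foldl (fun b c => if pvF fl c > pvF fl b then c else b) b0,
       pvF fl (l.foldl (fun b c => if pvF fl c > pvF fl b then c else b) b0),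
       pvShapes fl (l.foldl (fun b c => if pvF fl c > pvF fl b then c else b) b0)) := by
  induction l generalizing b0 with
  | nil => rfl
  | cons c l IH =>
    simp only [List.foldl_cons]
    have hsc : (2 * (((fl.map (fun chord => transposeChordName chord c)).countP
          (fun chord => openChordShapes.contains chord) : Nat) : Int) +
          if c = 0 then 3 else 0) = pvF fl c := by
      simp [pvF, pvCnt, List.countP_map, Function.comp_def]
    by_cases h : pvF fl c > pvF fl b0
    · rw [if_pos (by rw [hsc]; exact h), if_pos h]
      rw [show (c,
            2 * (((fl.map (fun chord => transposeChordName chord c)).countP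
              (fun chord => openChordShapes.contains chord) : Nat) : Int) +
            if c = 0 then 3 else 0,
            fl.map (fun chord => transposeChordName chord c))
          = (c, pvF fl c, pvShapes fl c) from by rw [hsc]; rfl]
      exact IH c
    · rw [if_neg (by rw [hsc]; exact h), if_neg h]
      exact IH b0

-- A's whole loop: first iteration (capo 0) always wins over the -1 sentinel
theorem pvA_full (fl : List String) :
    (PySem.List.pyRange 0 8 1).foldl (fun (st : Int × Int × List String) capo =>
        if (2 * (((fl.map (fun chord => transposeChordName chord capo)).countP
              (fun chord => openChordShapes.contains chord) : Nat) : Int) +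
            if capo = 0 then 3 else 0) > st.2.1 then
          (capo,
            2 * (((fl.map (fun chord => transposeChordName chord capo)).countP
              (fun chord => openChordShapes.contains chord) : Nat) : Int) +
            if capo = 0 then 3 else 0,
            fl.map (fun chord => transposeChordName chord capo))
        else st)
      (0, -2, fl)
    = (pvArg fl, pvF fl (pvArg fl), pvShapes fl (pvArg fl)) := by
  rw [show PySem.List.pyRange 0 8 1 = 0 :: [1, 2, 3, 4, 5, 6, 7] from by decide,
    List.foldl_cons]
  have hsc : (2 * (((fl.map (fun chord => transposeChordName chord (0 : Int))).countP
        (fun chord => openChordShapes.contains chord) : Nat) : Int) +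
        if (0 : Int) = 0 then 3 else 0) = pvF fl 0 := by
    simp [pvF, pvCnt, List.countP_map, Function.comp_def]
  rw [if_pos (by rw [hsc]; have := pvCnt_nonneg fl 0; simp [pvF]; omega)]
  rw [show ((0 : Int),
        2 * (((fl.map (fun chord => transposeChordName chord (0 : Int))).countP
          (fun chord => openChordShapes.contains chord) : Nat) : Int) +
        if (0 : Int) = 0 then 3 else 0,
        fl.map (fun chord => transposeChordName chord (0 : Int)))
      = ((0 : Int), pvF fl 0, pvShapes fl 0) from by rw [hsc]; rfl]
  rw [pvA_fold fl [1, 2, 3, 4, 5, 6, 7] 0, pvArg_eq]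

-- root index B computes for a chord (same expression as in the port)
def pvR (chord : String) : Int :=
  ((PySem.List.index? pitchClasses
    (if PySem.Str.endswith chord "m" then String.ofList chord.toList.dropLast else chord)).getD 0 : Nat)

-- the per-quality indicator lemmas, over the abstract root string s
theorem pvKeyMaj (s : String) (hs : pitchClasses.contains s = true) (k : Nat) (hk : k < 8) :
    ((openMajorRootIdx.countP
        (fun t => PySem.Int.mod ((((PySem.List.index? pitchClasses s).getD 0 : Nat) : Int) - t) 12 = (k : Int)) : Nat) : Int)
    = if openChordShapes.contains
        ((PySem.List.pyGet? pitchClasses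
          (PySem.Int.mod ((((PySem.List.index? pitchClasses s).getD 0 : Nat) : Int) - (k : Int)) 12)).getD "")
      then 1 else 0 := by
  simp only [pitchClasses, List.contains_eq_mem, decide_eq_true_eq, List.mem_cons,
    List.not_mem_nil, or_false] at hs
  rcases hs with h | h | h | h | h | h | h | h | h | h | h | h <;> subst h <;>
    interval_cases k <;> decide

theorem pvKeyMin (s : String) (hs : pitchClasses.contains s = true) (k : Nat) (hk : k < 8) :
    ((openMinorRootIdx.countP
        (fun t => PySem.Int.mod ((((PySem.List.index? pitchClasses s).getD 0 : Nat) : Int) - t) 12 = (k : Int)) : Nat) : Int)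
    = if openChordShapes.contains
        (((PySem.List.pyGet? pitchClasses
          (PySem.Int.mod ((((PySem.List.index? pitchClasses s).getD 0 : Nat) : Int) - (k : Int)) 12)).getD "") ++ "m")
      then 1 else 0 := by
  simp only [pitchClasses, List.contains_eq_mem, decide_eq_true_eq, List.mem_cons,
    List.not_mem_nil, or_false] at hs
  rcases hs with h | h | h | h | h | h | h | h | h | h | h | h <;> subst h <;>
    interval_cases k <;> decide

-- per chord: B's target hits at capo k = A's open-shape indicator at capo k
theorem pvIndicator (chord : String) (h1 : ¬ chord = "N") (h2 : pvChordRootOk chord = true)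
    (k : Nat) (hk : k < 8) :
    (((if PySem.Str.endswith chord "m" then openMinorRootIdx else openMajorRootIdx).countP
        (fun t => PySem.Int.mod (pvR chord - t) 12 = (k : Int)) : Nat) : Int)
    = if openChordShapes.contains (transposeChordName chord (k : Int)) then 1 else 0 := by
  unfold pvChordRootOk at h2
  unfold pvR transposeChordName parseChord
  cases hmi : PySem.Str.endswith chord "m" <;> rw [hmi] at h2 <;>
    simp only [if_true, if_false, Bool.false_eq_true, h1]
  · exact pvKeyMaj chord h2 k hk
  · exact pvKeyMin _ h2 k hk

-- B's inner fold over the target list, pointwise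
theorem pvInner_getD (r : Int) (ts : List Int) (sc : List Int) (k : Nat) (hk : k < 8) :
    (ts.foldl (fun sc t =>
        if PySem.Int.mod (r - t) 12 < 8 then
          (List.range 8).map (fun j => sc.getD j 0 + if (j : Int) = PySem.Int.mod (r - t) 12 then 2 else 0)
        else sc) sc).getD k 0
    = sc.getD k 0 + 2 * ((ts.countP (fun t => PySem.Int.mod (r - t) 12 = (k : Int)) : Nat) : Int) := by
  induction ts generalizing sc with
  | nil => simp
  | cons t ts IH =>
    simp only [List.foldl_cons, List.countP_cons]
    by_cases h : PySem.Int.mod (r - t) 12 < 8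
    · rw [if_pos h, IH]
      rw [PySem.List.getD_map_range _ 8 k 0 hk]
      by_cases he : PySem.Int.mod (r - t) 12 = (k : Int)
      · simp only [he, decide_true]; push_cast; ring
      · rw [if_neg (fun hkk => he hkk.symm), decide_eq_false he]
        push_cast; ring
    · rw [if_neg h, IH]
      have he : ¬ PySem.Int.mod (r - t) 12 = (k : Int) := by
        intro hkk; rw [hkk] at h; exact h (by exact_mod_cast hk)
      rw [decide_eq_false he]; push_cast; ring

theorem pvInner_length (r : Int) (ts : List Int) (sc : List Int) (hlen : sc.length = 8) :
    (ts.foldl (fun sc t =>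
        if PySem.Int.mod (r - t) 12 < 8 then
          (List.range 8).map (fun j => sc.getD j 0 + if (j : Int) = PySem.Int.mod (r - t) 12 then 2 else 0)
        else sc) sc).length = 8 := by
  induction ts generalizing sc with
  | nil => simpa
  | cons t ts IH =>
    simp only [List.foldl_cons]
    by_cases h : PySem.Int.mod (r - t) 12 < 8
    · rw [if_pos h]; exact IH _ (by simp)
    · rw [if_neg h]; exact IH _ hlen

-- B's outer scoring pass, pointwise: adds 2 · (open-shape count at capo k)
theorem pvOuter_getD (fl : List String)
    (hg : ∀ c ∈ fl, ¬ c = "N" ∧ pvChordRootOk c = true)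
    (sc : List Int) (hlen : sc.length = 8) (k : Nat) (hk : k < 8) :
    (fl.foldl (fun sc chord =>
        (if PySem.Str.endswith chord "m" then openMinorRootIdx else openMajorRootIdx).foldl (fun sc t =>
          if PySem.Int.mod (pvR chord - t) 12 < 8 then
            (List.range 8).map (fun j => sc.getD j 0 + if (j : Int) = PySem.Int.mod (pvR chord - t) 12 then 2 else 0)
          else sc) sc) sc).getD k 0
    = sc.getD k 0 + 2 * pvCnt fl (k : Int) := by
  induction fl generalizing sc with
  | nil => simp [pvCnt]
  | cons c fl IH =>
    simp only [List.foldl_cons]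
    have hlen' := pvInner_length (pvR c)
      (if PySem.Str.endswith c "m" then openMinorRootIdx else openMajorRootIdx) sc hlen
    rw [IH (fun x hx => hg x (List.mem_cons_of_mem _ hx)) _ hlen']
    rw [pvInner_getD _ _ _ k hk,
      pvIndicator c (hg c (List.mem_cons_self)).1 (hg c (List.mem_cons_self)).2 k hk]
    have : pvCnt (c :: fl) (k : Int) =
        (if openChordShapes.contains (transposeChordName c (k : Int)) then 1 else 0) + pvCnt fl (k : Int) := by
      simp only [pvCnt, List.countP_cons]
      split_ifs
      · simp; omega
      · simp
    rw [this]; ring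

theorem pvOuter_length (fl : List String) (sc : List Int) (hlen : sc.length = 8) :
    (fl.foldl (fun sc chord =>
        (if PySem.Str.endswith chord "m" then openMinorRootIdx else openMajorRootIdx).foldl (fun sc t =>
          if PySem.Int.mod (pvR chord - t) 12 < 8 then
            (List.range 8).map (fun j => sc.getD j 0 + if (j : Int) = PySem.Int.mod (pvR chord - t) 12 then 2 else 0)
          else sc) sc) sc).length = 8 := by
  induction fl generalizing sc with
  | nil => simpa
  | cons c fl IH => exact IH _ (pvInner_length _ _ _ hlen)

-- B's scoring pass, as the literal 8-element list of doubled counts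
theorem pvScoresB (fl : List String)
    (hg : ∀ c ∈ fl, ¬ c = "N" ∧ pvChordRootOk c = true) :
    fl.foldl (fun sc chord =>
        (if PySem.Str.endswith chord "m" then openMinorRootIdx else openMajorRootIdx).foldl (fun sc t =>
          if PySem.Int.mod ((((PySem.List.index? pitchClasses
                (if PySem.Str.endswith chord "m" then String.ofList chord.toList.dropLast else chord)).getD 0 : Nat) : Int) - t) 12 < 8 then
            (List.range 8).map (fun j => sc.getD j 0 +
              if (j : Int) = PySem.Int.mod ((((PySem.List.index? pitchClasses
                (if PySem.Str.endswith chord "m" then String.ofList chord.toList.dropLast else chord)).getD 0 : Nat) : Int) - t) 12 then 2 else 0)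
          else sc) sc) (List.replicate 8 0)
    = [2 * pvCnt fl 0, 2 * pvCnt fl 1, 2 * pvCnt fl 2, 2 * pvCnt fl 3,
       2 * pvCnt fl 4, 2 * pvCnt fl 5, 2 * pvCnt fl 6, 2 * pvCnt fl 7] := by
  show fl.foldl (fun sc chord =>
        (if PySem.Str.endswith chord "m" then openMinorRootIdx else openMajorRootIdx).foldl (fun sc t =>
          if PySem.Int.mod (pvR chord - t) 12 < 8 then
            (List.range 8).map (fun j => sc.getD j 0 + if (j : Int) = PySem.Int.mod (pvR chord - t) 12 then 2 else 0)
          else sc) sc) (List.replicate 8 0)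
    = [2 * pvCnt fl 0, 2 * pvCnt fl 1, 2 * pvCnt fl 2, 2 * pvCnt fl 3,
       2 * pvCnt fl 4, 2 * pvCnt fl 5, 2 * pvCnt fl 6, 2 * pvCnt fl 7]
  apply List.ext_getElem
  · rw [pvOuter_length fl _ (by simp)]; rfl
  · intro i hi hi2
    have hi8 : i < 8 := by simpa using hi2
    rw [← List.getD_eq_getElem _ 0 hi, ← List.getD_eq_getElem _ 0 hi2]
    rw [pvOuter_getD fl hg _ (by simp) i hi8]
    interval_cases i <;> simp [List.getD]

-- the two selection folds move in lockstep once the score array matches pvF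
theorem pvLock (fl : List String) (s : List Int)
    (hs : ∀ k : Nat, k < 8 → s.getD k 0 = pvF fl (k : Int)) :
    ∀ (l : List Nat), (∀ k ∈ l, k < 8) → ∀ (b : Nat), b < 8 →
      ((l.foldl (fun best capo => if s.getD capo 0 > s.getD best 0 then capo else best) b : Nat) : Int)
      = l.foldl (fun (bb : Int) (c : Nat) => if pvF fl (c : Int) > pvF fl bb then (c : Int) else bb) (b : Int) := by
  intro l
  induction l with
  | nil => intro _ b _; rfl
  | cons k l IH =>
    intro hl b hb
    simp only [List.foldl_cons]
    rw [hs k (hl k (by simp)), hs b hb]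
    by_cases h : pvF fl (k : Int) > pvF fl (b : Int)
    · rw [if_pos h, if_pos h]
      exact IH (fun x hx => hl x (by simp [hx])) k (hl k (by simp))
    · rw [if_neg h, if_neg h]
      exact IH (fun x hx => hl x (by simp [hx])) b hb

-- B's _shape agrees with A's transpose helper on every non-"N" chord
theorem pvShape_eq (chord : String) (h1 : ¬ chord = "N") (c : Int) :
    shapeAt chord c = transposeChordName chord c := by
  unfold shapeAt transposeChordName parseChord
  cases hmi : PySem.Str.endswith chord "m" <;>
    simp [h1]

-- ===== VERDICT (by name: the statement is the Claim_ definition above) =====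
theorem suggest_capo_spec : Claim_equal_suggest_capo := by
  intro ps _ hpre
  unfold Spec_suggest_capo
  by_cases h1 : ps.filter (fun chord => chord ≠ "N") = []
  · unfold suggest_capo suggest_capo_alt
    simp only [h1, if_true]
  by_cases h2 : ((PySem.List.slice (ps.filter (fun chord => chord ≠ "N")) none (some 8)).all
      (fun chord => openChordShapes.contains chord)) = true
  · unfold suggest_capo suggest_capo_alt
    simp only [h1, h2, if_false, if_true]
  have h3 : (ps.filter (fun chord => chord ≠ "N")).all pvChordRootOk = true := by
    rcases hpre with h | h | h
    · exact absurd h h1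
    · exact absurd h h2
    · exact h
  unfold suggest_capo suggest_capo_alt
  simp only [h1, h2, Bool.false_eq_true, if_false]
  set fl := List.filter (fun chord => decide (chord ≠ "N")) ps with hfl
  have hg : ∀ c ∈ fl, ¬ c = "N" ∧ pvChordRootOk c = true := by
    intro c hc
    refine ⟨by simpa using (List.mem_filter.mp hc).2, ?_⟩
    rw [List.all_eq_true] at h3
    exact h3 c hc
  rw [pvA_full, pvScoresB fl hg]
  dsimp only
  have hs : ∀ k : Nat, k < 8 →
      ([2 * pvCnt fl 0 + 3, 2 * pvCnt fl 1, 2 * pvCnt fl 2, 2 * pvCnt fl 3,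
        2 * pvCnt fl 4, 2 * pvCnt fl 5, 2 * pvCnt fl 6, 2 * pvCnt fl 7].getD k 0)
      = pvF fl (k : Int) := by
    intro k hk
    interval_cases k <;> norm_num [pvF, List.getD]
  have hcast := pvLock fl _ hs (List.range' 1 7) (by decide) 0 (by decide)
  rw [show List.foldl (fun (bb : Int) (c : Nat) => if pvF fl (c : Int) > pvF fl bb then (c : Int) else bb)
        ((0 : Nat) : Int) (List.range' 1 7) = pvArg fl from rfl] at hcast
  set N := List.foldl (fun best capo =>
      if [2 * pvCnt fl 0 + 3, 2 * pvCnt fl 1, 2 * pvCnt fl 2, 2 * pvCnt fl 3,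
          2 * pvCnt fl 4, 2 * pvCnt fl 5, 2 * pvCnt fl 6, 2 * pvCnt fl 7].getD capo 0 >
         [2 * pvCnt fl 0 + 3, 2 * pvCnt fl 1, 2 * pvCnt fl 2, 2 * pvCnt fl 3,
          2 * pvCnt fl 4, 2 * pvCnt fl 5, 2 * pvCnt fl 6, 2 * pvCnt fl 7].getD best 0
       then capo else best) 0 (List.range' 1 7) with hN
  by_cases hz : pvArg fl = 0
  · have hN0 : N = 0 := by
      have : (N : Int) = 0 := hcast.trans hz
      exact_mod_cast this
    rw [if_pos hz, if_pos hN0]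
  · have hN0 : ¬ N = 0 := fun h => hz (by rw [← hcast, h]; rfl)
    rw [if_neg hz, if_neg hN0, ← hcast]
    have hshapes : PySem.List.slice (pvShapes fl ((N : Nat) : Int)) none (some 4)
        = (PySem.List.slice fl none (some 4)).map (fun chord => shapeAt chord ((N : Nat) : Int)) := by
      rw [PySem.List.slice_to _ (by norm_num : (0:Int) ≤ 4),
        PySem.List.slice_to _ (by norm_num : (0:Int) ≤ 4), pvShapes, List.map_take]
      exact congrArg (List.take (Int.toNat 4))
        (List.map_congr_left fun c hc => (pvShape_eq c (hg c hc).1 _).symm)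
    rw [hshapes]
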